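-- pv_equiv track=rewrite | github.com/luciasucunza/unsam_python | ejercicios_python/Clase_10/hojas_ISO.py | hoja_ISO
-- ===== SOURCE A (Python) =====
-- def hoja_ISO(n):
--     '''
--     Precondición: n debe ser un número entero mayor a 0
--         Devuelve: el ancho y el largo de la hoja A(N) en milimetros
--     '''
--
--     if n == 0:
--         ancho = 841
--         largo = 1189
--
--     else:
--         pre_ancho, pre_largo = hoja_ISO(n-1)
--
--         # Se invierten las dimensiones y la que era mayor se divide por dos
--         if pre_ancho > pre_largo:
--             largo = pre_ancho//2
--             ancho = pre_largo
--         else: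
--             largo = pre_ancho
--             ancho = pre_largo//2
--
--     return ancho, largo
-- ===== SOURCE B (Python) =====
-- def hoja_ISO(n):
--     ancho, largo = 841, 1189
--     for _ in range(n):
--         if ancho > largo:
--             ancho, largo = largo, ancho // 2
--         else:
--             ancho, largo = largo // 2, ancho
--     return ancho, largo
-- ===== Notes on version B (the rewrite author's own statement) =====
-- stated objective: simpler
-- what changed: Replaces the recursion on n with an iterative loop that maintains the running (ancho, largo) pair over range(n).
import Mathlib
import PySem

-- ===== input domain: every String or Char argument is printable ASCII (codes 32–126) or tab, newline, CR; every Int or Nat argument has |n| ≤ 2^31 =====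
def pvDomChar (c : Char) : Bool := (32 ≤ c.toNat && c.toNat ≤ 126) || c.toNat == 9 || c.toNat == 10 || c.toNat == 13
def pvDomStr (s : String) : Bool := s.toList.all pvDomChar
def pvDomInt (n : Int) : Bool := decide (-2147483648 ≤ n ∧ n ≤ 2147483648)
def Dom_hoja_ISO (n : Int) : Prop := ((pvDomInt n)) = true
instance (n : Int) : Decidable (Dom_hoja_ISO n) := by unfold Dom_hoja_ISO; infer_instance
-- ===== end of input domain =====

-- B replaces A's recursion on n with an iterative loop maintaining the (ancho, largo) pair; equal on n ≥ 0 (A diverges for n < 0, B returns the base pair).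

-- ===== PORT A =====
-- A's recursion, on the Nat depth (Python diverges for n < 0; Pre_ excludes those inputs).
def hoja_ISO_rec : Nat → Int × Int
  | 0 => (841, 1189)
  | k + 1 =>
    let (pre_ancho, pre_largo) := hoja_ISO_rec k
    if pre_ancho > pre_largo then (pre_largo, PySem.Int.floordiv pre_ancho 2)
    else (PySem.Int.floordiv pre_largo 2, pre_ancho)

def hoja_ISO (n : Int) : Int × Int := hoja_ISO_rec n.toNat

-- ===== PORT B =====
def hoja_ISO_alt (n : Int) : Int × Int :=
  (PySem.List.pyRange 0 n 1).foldl
    (fun (p : Int × Int) _ =>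
      if p.1 > p.2 then (p.2, PySem.Int.floordiv p.1 2)
      else (PySem.Int.floordiv p.2 2, p.1))
    (841, 1189)

-- ===== PRECONDITION & SPEC =====
-- A diverges (RecursionError) for n < 0; Pre_ admits exactly the inputs where A returns.
def Pre_hoja_ISO (n : Int) : Prop := 0 ≤ n
instance (n : Int) : Decidable (Pre_hoja_ISO n) := by unfold Pre_hoja_ISO; infer_instance
def pvWitness_hoja_ISO : Int := 4

def Spec_hoja_ISO (n : Int) (out : Int × Int) : Prop := out = hoja_ISO_alt n
instance (n : Int) (out : Int × Int) : Decidable (Spec_hoja_ISO n out) := by unfold Spec_hoja_ISO; infer_instance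

-- ===== CLAIM (what is proved, stated in full; the proofs are below) =====
def Claim_equal_hoja_ISO : Prop := ∀ (n : Int), Dom_hoja_ISO n → Pre_hoja_ISO n → Spec_hoja_ISO n (hoja_ISO n)

-- ===== LEMMAS AND PROOFS =====

-- B's fold ignores the list elements, so it only depends on the list length; on a Nat length it coincides with A's recursion.
theorem fold_eq_rec (l : List Int) :
    l.foldl
      (fun (p : Int × Int) _ =>
        if p.1 > p.2 then (p.2, PySem.Int.floordiv p.1 2)
        else (PySem.Int.floordiv p.2 2, p.1))
      (841, 1189) = hoja_ISO_rec l.length := by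
  induction l using List.reverseRecOn with
  | nil => rfl
  | append_singleton xs x ih =>
    simp only [List.foldl_append, List.foldl_cons, List.foldl_nil, ih,
      List.length_append, List.length_cons, List.length_nil]
    rfl

-- ===== VERDICT (by name: the statement is the Claim_ definition above) =====
theorem hoja_ISO_spec : Claim_equal_hoja_ISO := by
  intro n _ hn
  unfold Spec_hoja_ISO hoja_ISO hoja_ISO_alt
  rw [fold_eq_rec, PySem.List.length_pyRange_one]
  norm_num
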